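-- pv_equiv track=rewrite | github.com/jseltmann/GeDisCo | transfer_rels.py | _single_sent
-- ===== SOURCE A (Python) =====
-- def _single_sent(i_inds, e_inds, sent_inds):
--     """
--     Return true, if each argument of the relation
--     is contained in one sentence each.
--     Also count as true, if the last word of the argument is
--     in the next sentence.
--     """
--     for j, curr_sent in enumerate(sent_inds):
--         comb = [i for i in i_inds if i in curr_sent]
--         overhang = [i for i in i_inds if i not in curr_sent]
--         if len(comb) > 0 and len(overhang) < 2:
--             if j < len(sent_inds) - 1:
--                 next_sent = sent_inds[j+1]
--                 comb2 = [i for i in e_inds if i in next_sent]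
--                 overhang2 = [i for i in e_inds if i not in next_sent]
--                 if len(comb2) > 0 and len(overhang) < 2:
--                     return True
--             if j > 0:
--                 prev_sent = sent_inds[j-1]
--                 comb2 = [i for i in e_inds if i in prev_sent]
--                 overhang2 = [i for i in e_inds if i not in prev_sent]
--                 if len(comb2) > 0 and len(overhang) < 2:
--                     return True
--     return False
-- ===== SOURCE B (Python) =====
-- def _single_sent(i_inds, e_inds, sent_inds):
--     # Pass 1: indices of sentences containing at least one e_ind,
--     # and indices of sentences that "qualify" for the i-argument.
--     e_set = set()
--     qual = []
--     for j, sent in enumerate(sent_inds):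
--         if any(e in sent for e in e_inds):
--             e_set.add(j)
--         if any(i in sent for i in i_inds) and sum(1 for i in i_inds if i not in sent) < 2:
--             qual.append(j)
--     # Pass 2: any qualifying sentence adjacent to an e-sentence?
--     return any(j + 1 in e_set or j - 1 in e_set for j in qual)
-- ===== Notes on version B (the rewrite author's own statement) =====
-- stated objective: alternative
-- what changed: Replaced the single nested scan with early return by two separate passes: one pass collects the set of sentence indices containing an e_ind and the list of sentence indices qualifying for i_inds, then a second pass checks adjacency of indices against that set.
import Mathlib
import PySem

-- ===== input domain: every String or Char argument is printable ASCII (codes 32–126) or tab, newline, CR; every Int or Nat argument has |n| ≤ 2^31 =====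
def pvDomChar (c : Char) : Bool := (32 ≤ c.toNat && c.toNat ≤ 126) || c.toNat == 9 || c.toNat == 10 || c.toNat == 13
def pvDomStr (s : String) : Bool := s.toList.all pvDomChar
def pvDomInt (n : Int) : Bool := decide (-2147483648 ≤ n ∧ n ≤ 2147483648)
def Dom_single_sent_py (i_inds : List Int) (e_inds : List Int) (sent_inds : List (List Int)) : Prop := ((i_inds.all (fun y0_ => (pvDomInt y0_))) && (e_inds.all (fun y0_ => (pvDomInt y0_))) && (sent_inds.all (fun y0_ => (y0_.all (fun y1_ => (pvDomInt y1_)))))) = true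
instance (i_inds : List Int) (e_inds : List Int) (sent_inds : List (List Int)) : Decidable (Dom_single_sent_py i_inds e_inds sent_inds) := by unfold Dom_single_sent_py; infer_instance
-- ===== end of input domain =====

-- B uses two separate passes (build the e-sentence index set and the list of
-- qualifying i-indices, then check index adjacency) instead of A's single nested
-- scan with early return; alternative decomposition, same cost.

-- ===== PORT A =====
-- '[i for i in xs if i in sent_inds[k]]'
def combA (xs : List Int) (sent_inds : List (List Int)) (k : Nat) : List Int :=
  xs.filter (fun i => (sent_inds.getD k []).contains i)

-- '[i for i in xs if i not in sent_inds[k]]'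
def overhangA (xs : List Int) (sent_inds : List (List Int)) (k : Nat) : List Int :=
  xs.filter (fun i => !(sent_inds.getD k []).contains i)

-- the body of A's 'for j, curr_sent in enumerate(sent_inds)' loop: true iff
-- iteration j executes one of the two 'return True' statements
def stepA (i_inds e_inds : List Int) (sent_inds : List (List Int)) (j : Nat) : Bool :=
  if (combA i_inds sent_inds j).length > 0 ∧ (overhangA i_inds sent_inds j).length < 2 then
    -- 'if j < len(sent_inds) - 1: … if len(comb2) > 0 and len(overhang) < 2: return True'
    if j < sent_inds.length - 1 ∧
       ((combA e_inds sent_inds (j+1)).length > 0 ∧ (overhangA i_inds sent_inds j).length < 2) then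
      true
    -- 'if j > 0: … if len(comb2) > 0 and len(overhang) < 2: return True'
    else if 0 < j ∧
       ((combA e_inds sent_inds (j-1)).length > 0 ∧ (overhangA i_inds sent_inds j).length < 2) then
      true
    else false
  else false

-- the loop itself, entered at position j
def ssGoA (i_inds e_inds : List Int) (sent_inds : List (List Int)) (j : Nat) : Bool :=
  if j < sent_inds.length then
    if stepA i_inds e_inds sent_inds j then true
    else ssGoA i_inds e_inds sent_inds (j+1)
  else false
termination_by sent_inds.length - j

def single_sent_py (i_inds : List Int) (e_inds : List Int) (sent_inds : List (List Int)) : Bool :=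
  ssGoA i_inds e_inds sent_inds 0

-- ===== PORT B =====
def single_sent_py_alt (i_inds : List Int) (e_inds : List Int) (sent_inds : List (List Int)) : Bool :=
  -- pass 1: e_set = indices of sentences containing some e_ind
  -- (as Ints, so j-1 at j=0, i.e. -1, is simply absent)
  let e_set : List Int :=
    ((List.range sent_inds.length).filter
      (fun j => e_inds.any (fun e => (sent_inds.getD j []).contains e))).map (fun j => (j : Int))
  -- pass 1': qual = indices of sentences qualifying for i_inds
  let qual : List Nat :=
    (List.range sent_inds.length).filter
      (fun j => i_inds.any (fun i => (sent_inds.getD j []).contains i) &&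
                decide ((i_inds.filter (fun i => !(sent_inds.getD j []).contains i)).length < 2))
  -- pass 2: any qualifying sentence adjacent to an e-sentence?
  qual.any (fun j => e_set.contains ((j : Int) + 1) || e_set.contains ((j : Int) - 1))

-- ===== PRECONDITION & SPEC =====
def Spec_single_sent_py (i_inds : List Int) (e_inds : List Int) (sent_inds : List (List Int)) (out : Bool) : Prop := out = single_sent_py_alt i_inds e_inds sent_inds
instance (i_inds : List Int) (e_inds : List Int) (sent_inds : List (List Int)) (out : Bool) : Decidable (Spec_single_sent_py i_inds e_inds sent_inds out) := by unfold Spec_single_sent_py; infer_instance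

-- ===== CLAIM (what is proved, stated in full; the proofs are below) =====
def Claim_equal_single_sent_py : Prop := ∀ (i_inds : List Int) (e_inds : List Int) (sent_inds : List (List Int)), Dom_single_sent_py i_inds e_inds sent_inds → Spec_single_sent_py i_inds e_inds sent_inds (single_sent_py i_inds e_inds sent_inds)

-- ===== LEMMAS AND PROOFS =====

-- sentence k contains some e_ind
def eHit (e_inds : List Int) (sent_inds : List (List Int)) (k : Nat) : Prop :=
  ∃ e ∈ e_inds, e ∈ sent_inds.getD k []

-- sentence k qualifies for the i-argument
def iQual (i_inds : List Int) (sent_inds : List (List Int)) (k : Nat) : Prop :=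
  (∃ i ∈ i_inds, i ∈ sent_inds.getD k []) ∧
    (i_inds.filter (fun i => !(sent_inds.getD k []).contains i)).length < 2

-- the success condition at position k: both programs return true iff it holds somewhere
def hitAt (i_inds e_inds : List Int) (sent_inds : List (List Int)) (k : Nat) : Prop :=
  iQual i_inds sent_inds k ∧
    ((k + 1 < sent_inds.length ∧ eHit e_inds sent_inds (k+1)) ∨
     (0 < k ∧ eHit e_inds sent_inds (k-1)))

-- 'len([i for i in l if p(i)]) > 0' is an ∃-membership fact
lemma filter_len_pos (l : List Int) (p : Int → Bool) :
    0 < (l.filter p).length ↔ ∃ a ∈ l, p a = true := by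
  simp [List.length_pos_iff, List.filter_eq_nil_iff]

lemma stepA_iff (i_inds e_inds : List Int) (sent_inds : List (List Int)) (j : Nat)
    (hlt : j < sent_inds.length) :
    stepA i_inds e_inds sent_inds j = true ↔ hitAt i_inds e_inds sent_inds j := by
  have hq : ((combA i_inds sent_inds j).length > 0 ∧ (overhangA i_inds sent_inds j).length < 2) ↔
      iQual i_inds sent_inds j := by
    unfold combA overhangA iQual
    rw [gt_iff_lt, filter_len_pos]
    simp
  have hnx : ∀ m, (combA e_inds sent_inds m).length > 0 ↔ eHit e_inds sent_inds m := by
    intro m; unfold combA eHit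
    rw [gt_iff_lt, filter_len_pos]
    simp
  unfold stepA hitAt
  by_cases h1 : ((combA i_inds sent_inds j).length > 0 ∧ (overhangA i_inds sent_inds j).length < 2)
  · rw [if_pos h1]
    by_cases h2 : (j < sent_inds.length - 1 ∧
        ((combA e_inds sent_inds (j+1)).length > 0 ∧ (overhangA i_inds sent_inds j).length < 2))
    · rw [if_pos h2]
      simp only [true_iff]
      exact ⟨hq.mp h1, Or.inl ⟨by omega, (hnx (j+1)).mp h2.2.1⟩⟩
    · rw [if_neg h2]
      by_cases h3 : (0 < j ∧
          ((combA e_inds sent_inds (j-1)).length > 0 ∧ (overhangA i_inds sent_inds j).length < 2))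
      · rw [if_pos h3]
        simp only [true_iff]
        exact ⟨hq.mp h1, Or.inr ⟨h3.1, (hnx (j-1)).mp h3.2.1⟩⟩
      · rw [if_neg h3]
        refine ⟨fun hf => absurd hf Bool.false_ne_true, fun hh => ?_⟩
        exfalso
        rcases hh with ⟨hqj, hadj | hadj⟩
        · exact h2 ⟨by omega, (hnx (j+1)).mpr hadj.2, h1.2⟩
        · exact h3 ⟨hadj.1, (hnx (j-1)).mpr hadj.2, h1.2⟩
  · rw [if_neg h1]
    exact ⟨fun hf => absurd hf Bool.false_ne_true, fun hh => absurd (hq.mpr hh.1) h1⟩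

lemma ssGoA_iff (i_inds e_inds : List Int) (sent_inds : List (List Int)) :
    ∀ (n j : Nat), sent_inds.length - j ≤ n →
      (ssGoA i_inds e_inds sent_inds j = true ↔
        ∃ k, j ≤ k ∧ k < sent_inds.length ∧ hitAt i_inds e_inds sent_inds k) := by
  intro n
  induction n with
  | zero =>
    intro j hj
    rw [ssGoA]
    have h : ¬ j < sent_inds.length := by omega
    rw [if_neg h]
    exact ⟨fun hf => absurd hf Bool.false_ne_true, fun ⟨k, hk1, hk2, _⟩ => by omega⟩
  | succ n ih =>
    intro j hj
    rw [ssGoA]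
    by_cases hlt : j < sent_inds.length
    · rw [if_pos hlt]
      by_cases hs : stepA i_inds e_inds sent_inds j = true
      · rw [if_pos hs]
        simp only [true_iff]
        exact ⟨j, le_refl _, hlt, (stepA_iff _ _ _ _ hlt).mp hs⟩
      · rw [if_neg hs]
        rw [ih (j+1) (by omega)]
        constructor
        · rintro ⟨k, hk1, hk2, hk3⟩; exact ⟨k, by omega, hk2, hk3⟩
        · rintro ⟨k, hk1, hk2, hk3⟩
          rcases Nat.eq_or_lt_of_le hk1 with rfl | h
          · exact absurd ((stepA_iff _ _ _ _ hlt).mpr hk3) hs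
          · exact ⟨k, by omega, hk2, hk3⟩
    · rw [if_neg hlt]
      exact ⟨fun hf => absurd hf Bool.false_ne_true, fun ⟨k, hk1, hk2, _⟩ => by omega⟩

-- membership in B's e_set (Nat indices cast to Int)
lemma mem_intmap (q : Nat → Bool) (L : Nat) (x : Int) :
    (x ∈ (((List.range L).filter q).map (fun j => (j:Int)))) ↔
      ∃ m, m < L ∧ q m = true ∧ (m:Int) = x := by
  simp [List.mem_filter]
  tauto

lemma alt_iff (i_inds e_inds : List Int) (sent_inds : List (List Int)) :
    (single_sent_py_alt i_inds e_inds sent_inds = true ↔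
      ∃ k, k < sent_inds.length ∧ hitAt i_inds e_inds sent_inds k) := by
  unfold single_sent_py_alt
  simp only [List.any_eq_true, List.mem_filter, List.mem_range, Bool.or_eq_true,
    List.contains_iff_mem, mem_intmap, Bool.and_eq_true, decide_eq_true_eq]
  unfold hitAt iQual eHit
  constructor
  · rintro ⟨j, ⟨hjlen, hany, hover⟩, hadj⟩
    refine ⟨j, hjlen, ⟨⟨?_, ?_⟩, ?_⟩⟩
    · simpa using hany
    · simpa using hover
    · rcases hadj with ⟨m, hm1, hm2, hmeq⟩ | ⟨m, hm1, hm2, hmeq⟩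
      · have : m = j + 1 := by omega
        subst this
        exact Or.inl ⟨hm1, by simpa using hm2⟩
      · have hj0 : 0 < j := by omega
        have : m = j - 1 := by omega
        subst this
        exact Or.inr ⟨hj0, by simpa using hm2⟩
  · rintro ⟨k, hklen, ⟨⟨hany, hover⟩, hadj⟩⟩
    refine ⟨k, ⟨hklen, by simpa using hany, by simpa using hover⟩, ?_⟩
    rcases hadj with ⟨hk1, he⟩ | ⟨hk0, he⟩
    · exact Or.inl ⟨k + 1, hk1, by simpa using he, by push_cast; ring⟩
    · exact Or.inr ⟨k - 1, by omega, by simpa using he, by omega⟩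

-- ===== VERDICT (by name: the statement is the Claim_ definition above) =====
theorem single_sent_py_spec : Claim_equal_single_sent_py := by
  intro i_inds e_inds sent_inds _
  unfold Spec_single_sent_py single_sent_py
  have hA := ssGoA_iff i_inds e_inds sent_inds sent_inds.length 0 (by omega)
  have hB := alt_iff i_inds e_inds sent_inds
  rcases hb : single_sent_py_alt i_inds e_inds sent_inds with _ | _
  · rcases ha : ssGoA i_inds e_inds sent_inds 0 with _ | _
    · rfl
    · exfalso
      rcases hA.mp ha with ⟨k, _, hk, hh⟩
      have := hB.mpr ⟨k, hk, hh⟩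
      rw [hb] at this
      exact Bool.false_ne_true this
  · rcases hB.mp hb with ⟨k, hk, hh⟩
    exact hA.mpr ⟨k, Nat.zero_le _, hk, hh⟩
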